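-- pv_equiv track=rewrite | github.com/sunnyxrxrx/X-Voice | src/srp/model/jp_syllable.py | _len_two
-- ===== SOURCE A (Python) =====
-- def _len_one(convert_num: str, requested_dict: dict[str, str]) -> str:
--     return requested_dict[convert_num]
--
-- def _len_two(convert_num: str, requested_dict: dict[str, str]) -> str:
--     if convert_num[0] == "0":
--         return _len_one(convert_num[1], requested_dict)
--     if convert_num == "10":
--         return requested_dict["10"]
--     if convert_num[0] == "1":
--         return requested_dict["10"] + " " + _len_one(convert_num[1], requested_dict)
--     if convert_num[1] == "0":
--         return _len_one(convert_num[0], requested_dict) + " " + requested_dict["10"]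
--
--     num_list = [requested_dict[x] for x in convert_num]
--     num_list.insert(1, requested_dict["10"])
--     return " ".join(num_list)
-- ===== SOURCE B (Python) =====
-- _PLAN = {"00": ["o"], "0x": ["o"],
--          "10": ["T"], "1x": ["T", "o"],
--          "x0": ["t", "T"], "xx": ["t", "T", "o"]}
--
-- def _len_two(convert_num: str, requested_dict: dict[str, str]) -> str:
--     t, o = convert_num[0], convert_num[1]
--     pat = (t if t in "01" else "x") + ("0" if o == "0" else "x")
--     sub = {"t": t, "T": "10", "o": o}
--     return " ".join(requested_dict[sub[c]] for c in _PLAN[pat])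
-- ===== Notes on version B (the rewrite author's own statement) =====
-- stated objective: alternative
-- what changed: Replaces A's chain of five sequential return branches by a data-driven plan: classify the two digits into a pattern key, look the pattern up in a fixed 6-entry plan table of token-role lists, substitute the roles and join once.
-- outside the precondition, e.g. on _len_two('10a', {'10': 'juu', '0': 'rei'}): A returns 'juu rei', B returns 'juu'
import Mathlib
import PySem

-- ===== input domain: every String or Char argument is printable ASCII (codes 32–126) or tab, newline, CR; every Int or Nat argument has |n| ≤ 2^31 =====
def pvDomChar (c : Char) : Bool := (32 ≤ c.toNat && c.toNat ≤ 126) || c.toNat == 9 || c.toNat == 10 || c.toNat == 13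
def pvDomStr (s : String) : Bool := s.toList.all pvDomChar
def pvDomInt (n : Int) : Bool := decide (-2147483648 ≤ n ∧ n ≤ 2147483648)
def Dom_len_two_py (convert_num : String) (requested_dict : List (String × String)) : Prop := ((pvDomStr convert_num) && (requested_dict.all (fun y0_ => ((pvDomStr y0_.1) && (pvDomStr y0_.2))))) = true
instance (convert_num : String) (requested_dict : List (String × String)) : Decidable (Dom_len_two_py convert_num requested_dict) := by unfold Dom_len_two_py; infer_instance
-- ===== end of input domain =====

-- B replaces A's branch chain by a table-driven plan (pattern key → list of token
-- roles, substituted and joined once); objective: alternative decomposition.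

-- dict[k] on the association list: first match (Pre_ guarantees the key is present,
-- so the default is never used on admitted inputs; a missing key is Python's KeyError).
def pvLookupD {α : Type} (d : List (String × α)) (k : String) (dflt : α) : α :=
  (List.lookup k d).getD dflt

def pvDget (d : List (String × String)) (k : String) : String :=
  pvLookupD d k ""

-- ===== PORT A =====
-- _len_one(convert_num, requested_dict) = requested_dict[convert_num]
def lenOnePy (convert_num : String) (requested_dict : List (String × String)) : String :=
  pvDget requested_dict convert_num

def len_two_py (convert_num : String) (requested_dict : List (String × String)) : String :=
  let cs := convert_num.toList
  -- Pre_ guarantees indices 0 and 1 are in range, so pyGetD's default is never used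
  if PySem.List.pyGetD cs 0 ' ' = '0' then
    lenOnePy (String.ofList [PySem.List.pyGetD cs 1 ' ']) requested_dict
  else if convert_num = "10" then
    pvDget requested_dict "10"
  else if PySem.List.pyGetD cs 0 ' ' = '1' then
    pvDget requested_dict "10" ++ " " ++ lenOnePy (String.ofList [PySem.List.pyGetD cs 1 ' ']) requested_dict
  else if PySem.List.pyGetD cs 1 ' ' = '0' then
    lenOnePy (String.ofList [PySem.List.pyGetD cs 0 ' ']) requested_dict ++ " " ++ pvDget requested_dict "10"
  else
    let numList := cs.map (fun x => pvDget requested_dict (String.ofList [x]))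
    let numList := PySem.List.insert numList 1 (pvDget requested_dict "10")
    PySem.Str.join " " numList

-- ===== PORT B =====
-- module-level _PLAN table of Source B
def pvPlan : List (String × List String) :=
  [("00", ["o"]), ("0x", ["o"]),
   ("10", ["T"]), ("1x", ["T", "o"]),
   ("x0", ["t", "T"]), ("xx", ["t", "T", "o"])]

def len_two_py_alt (convert_num : String) (requested_dict : List (String × String)) : String :=
  let cs := convert_num.toList
  let t := PySem.List.pyGetD cs 0 ' '
  let o := PySem.List.pyGetD cs 1 ' '
  let pat : String := String.ofList
    [(if t = '0' ∨ t = '1' then t else 'x'), (if o = '0' then '0' else 'x')]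
  let sub : List (String × String) :=
    [("t", String.ofList [t]), ("T", "10"), ("o", String.ofList [o])]
  PySem.Str.join " "
    ((pvLookupD pvPlan pat []).map (fun c => pvDget requested_dict (pvDget sub c)))

-- ===== PRECONDITION & SPEC =====
def pvHasKey (d : List (String × String)) (k : String) : Bool :=
  (List.lookup k d).isSome

-- Pre_ restricts to the function's natural domain of two-character digit strings with the
-- looked-up keys present: A raises IndexError on shorter strings and KeyError on missing keys,
-- and A's generic last branch accidentally also accepts strings longer than two characters,
-- which are outside the two-digit contract this helper is written for.
def pvKeysOk (convert_num : String) (requested_dict : List (String × String)) : Bool :=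
  let t := convert_num.toList.getD 0 ' '
  let o := convert_num.toList.getD 1 ' '
  if t == '0' then pvHasKey requested_dict (String.ofList [o])
  else if t == '1' && o == '0' then pvHasKey requested_dict "10"
  else if t == '1' then pvHasKey requested_dict "10" && pvHasKey requested_dict (String.ofList [o])
  else if o == '0' then pvHasKey requested_dict (String.ofList [t]) && pvHasKey requested_dict "10"
  else pvHasKey requested_dict (String.ofList [t]) && pvHasKey requested_dict "10" &&
       pvHasKey requested_dict (String.ofList [o])

def Pre_len_two_py (convert_num : String) (requested_dict : List (String × String)) : Prop :=
  convert_num.toList.length = 2 ∧ pvKeysOk convert_num requested_dict = true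
instance (convert_num : String) (requested_dict : List (String × String)) : Decidable (Pre_len_two_py convert_num requested_dict) := by unfold Pre_len_two_py; infer_instance

def pvWitness_len_two_py : String × (List (String × String)) :=
  ("23", [("2", "ni"), ("3", "san"), ("10", "juu")])

def Spec_len_two_py (convert_num : String) (requested_dict : List (String × String)) (out : String) : Prop := out = len_two_py_alt convert_num requested_dict
instance (convert_num : String) (requested_dict : List (String × String)) (out : String) : Decidable (Spec_len_two_py convert_num requested_dict out) := by unfold Spec_len_two_py; infer_instance

-- ===== CLAIM (what is proved, stated in full; the proofs are below) =====
def Claim_equal_len_two_py : Prop := ∀ (convert_num : String) (requested_dict : List (String × String)), Dom_len_two_py convert_num requested_dict → Pre_len_two_py convert_num requested_dict → Spec_len_two_py convert_num requested_dict (len_two_py convert_num requested_dict)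

-- ===== LEMMAS AND PROOFS =====

theorem pvJoin_one (x : String) : PySem.Str.join " " [x] = x := by
  apply String.toList_inj.mp
  simp [PySem.Str.toList_join, PySem.Chars.join, List.intercalate]

theorem pvJoin_two (x y : String) : PySem.Str.join " " [x, y] = x ++ " " ++ y := by
  apply String.toList_inj.mp
  simp [PySem.Str.toList_join, PySem.Chars.join, List.intercalate]

theorem pvJoin_three (x y z : String) :
    PySem.Str.join " " [x, y, z] = x ++ " " ++ y ++ " " ++ z := by
  apply String.toList_inj.mp
  simp [PySem.Str.toList_join, PySem.Chars.join, List.intercalate]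

theorem pvInsert_one (m x y : String) : PySem.List.insert [x, y] 1 m = [x, m, y] := by
  simp [PySem.List.insert, PySem.List.sliceIndices]

theorem pvGetD_two_zero (a b : Char) : PySem.List.pyGetD [a, b] 0 ' ' = a := by
  simp [PySem.List.pyGetD, PySem.List.pyGet?, PySem.List.pyIdx?]

theorem pvGetD_two_one (a b : Char) : PySem.List.pyGetD [a, b] 1 ' ' = b := by
  simp [PySem.List.pyGetD, PySem.List.pyGet?, PySem.List.pyIdx?]

-- ===== VERDICT (by name: the statement is the Claim_ definition above) =====
theorem len_two_py_spec : Claim_equal_len_two_py := by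
  intro s d _ hpre
  obtain ⟨hlen, -⟩ := hpre
  obtain ⟨a, b, hab⟩ := List.length_eq_two.mp hlen
  have hs : s = String.ofList [a, b] := by rw [← hab, String.ofList_toList]
  subst hs
  unfold Spec_len_two_py len_two_py len_two_py_alt
  simp only [String.toList_ofList, pvGetD_two_zero, pvGetD_two_one]
  by_cases ha0 : a = '0'
  · by_cases hb0 : b = '0' <;>
      simp [ha0, hb0, lenOnePy, pvPlan, pvLookupD, pvDget, List.lookup, pvJoin_one]
  · have h10 : (String.ofList [a, b] = "10") ↔ (a = '1' ∧ b = '0') := by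
      constructor
      · intro h
        have h' := congrArg String.toList h
        have h2 : ("10" : String).toList = ['1', '0'] := by decide
        rw [String.toList_ofList, h2] at h'
        exact ⟨(List.cons_eq_cons.mp h').1, (List.cons_eq_cons.mp (List.cons_eq_cons.mp h').2).1⟩
      · rintro ⟨rfl, rfl⟩; rfl
    by_cases ha1 : a = '1'
    · by_cases hb0 : b = '0'
      · rw [if_neg ha0, if_pos (h10.mpr ⟨ha1, hb0⟩)]
        simp [ha1, hb0, pvPlan, pvLookupD, pvDget, List.lookup, pvJoin_one]
      · have hS : ¬ (String.ofList [a, b] = "10") := fun h => hb0 (h10.mp h).2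
        rw [if_neg ha0, if_neg hS, if_pos ha1]
        simp [ha1, hb0, lenOnePy, pvPlan, pvLookupD, pvDget, List.lookup, pvJoin_two]
    · have hS : ¬ (String.ofList [a, b] = "10") := fun h => ha1 (h10.mp h).1
      by_cases hb0 : b = '0'
      · rw [if_neg ha0, if_neg hS, if_neg ha1, if_pos hb0]
        simp [ha0, ha1, hb0, lenOnePy, pvPlan, pvLookupD, pvDget, List.lookup, pvJoin_two]
      · rw [if_neg ha0, if_neg hS, if_neg ha1, if_neg hb0]
        simp only [List.map_cons, List.map_nil, pvInsert_one]
        simp [ha0, ha1, hb0, pvPlan, pvLookupD, pvDget, List.lookup, pvJoin_three]
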